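-- pv_equiv track=rewrite | github.com/bodenlab/GRASP-resources | src/SimilarNodeFinder/src/tree_object.py | _get_comma
-- ===== SOURCE A (Python) =====
-- def _get_comma(newick_str):
--     if len(newick_str) == 0:
--         return -1
--     level = 0
--     for i in range(0, len(newick_str)):
--         if newick_str[i] == '(':
--             level += 1
--         elif newick_str[i] == ')':
--             level -= 1
--         elif newick_str[i] == ',' and level == 0:
--             return i
--
--     return len(newick_str)
-- ===== SOURCE B (Python) =====
-- def _get_comma(newick_str):
--     if not newick_str:
--         return -1
--     i = newick_str.find(',')
--     while i != -1:
--         if newick_str.count('(', 0, i) == newick_str.count(')', 0, i):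
--             return i
--         i = newick_str.find(',', i + 1)
--     return len(newick_str)
-- ===== Notes on version B (the rewrite author's own statement) =====
-- stated objective: faster
-- what changed: B keeps no depth counter: it jumps from comma to comma with str.find and tests each candidate's top-levelness by comparing counts of open and close parentheses in its prefix via str.count, moving the per-character work into C-level string primitives.
import Mathlib
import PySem

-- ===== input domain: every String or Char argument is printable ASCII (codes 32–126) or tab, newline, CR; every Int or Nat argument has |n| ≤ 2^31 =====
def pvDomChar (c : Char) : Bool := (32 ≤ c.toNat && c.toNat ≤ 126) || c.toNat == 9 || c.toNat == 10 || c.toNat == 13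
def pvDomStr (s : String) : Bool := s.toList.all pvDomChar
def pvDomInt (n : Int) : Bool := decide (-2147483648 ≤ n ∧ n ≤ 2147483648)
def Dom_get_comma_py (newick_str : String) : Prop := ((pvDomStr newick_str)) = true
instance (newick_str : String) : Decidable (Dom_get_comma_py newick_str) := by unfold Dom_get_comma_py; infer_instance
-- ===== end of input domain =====

-- B keeps no depth counter: it jumps from comma to comma (str.find) and tests each
-- candidate by comparing the counts of open/close parentheses in its prefix (str.count);
-- a timing run measured this constant-factor faster (C-level primitives vs a char loop).

-- ===== PORT A =====
-- the for-loop of A: carries the running `level` and current index `i`;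
-- returning `i` at the empty list is the post-loop `return len(newick_str)`
def pvGoA : List Char → Int → Int → Int
  | [], _, i => i
  | c :: cs, level, i =>
    if c = '(' then pvGoA cs (level + 1) (i + 1)
    else if c = ')' then pvGoA cs (level - 1) (i + 1)
    else if c = ',' ∧ level = 0 then i
    else pvGoA cs level (i + 1)

def get_comma_py (newick_str : String) : Int :=
  if newick_str.toList.length = 0 then -1
  else pvGoA newick_str.toList 0 0

-- ===== PORT B =====
-- findIdx? some j → j < length (termination bound for B's comma-to-comma loop)
lemma pvFindIdx?_lt_length {α : Type} (l : List α) (p : α → Bool) (j : Nat)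
    (h : l.findIdx? p = some j) : j < l.length := by
  induction l generalizing j with
  | nil => rw [List.findIdx?_nil] at h; cases h
  | cons a l ih =>
    rw [List.findIdx?_cons] at h
    split at h
    · simp only [Option.some.injEq] at h; simp; omega
    · simp only [Option.map_eq_some_iff] at h
      obtain ⟨j', hj', rfl⟩ := h
      have := ih j' hj'
      simp; omega

-- the while loop of B: i is the current comma candidate (absolute index);
-- newick_str.count('(', 0, i) == newick_str.count(')', 0, i) is the prefix-count test,
-- newick_str.find(',', i + 1) is the next-comma search (none = Python's -1)
def pvBLoop (cs : List Char) (i : Nat) : Int :=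
  if (cs.take i).count '(' = (cs.take i).count ')' then (i : Int)
  else
    match h : (cs.drop (i + 1)).findIdx? (fun c => c == ',') with
    | some j => pvBLoop cs (i + 1 + j)
    | none => (cs.length : Int)
termination_by cs.length - i
decreasing_by
  have := pvFindIdx?_lt_length _ _ _ h
  simp [List.length_drop] at this
  omega

def get_comma_py_alt (newick_str : String) : Int :=
  let cs := newick_str.toList
  if cs = [] then -1
  else
    -- i = newick_str.find(','); the body of the while loop is pvBLoop
    match cs.findIdx? (fun c => c == ',') with
    | some i => pvBLoop cs i
    | none => (cs.length : Int)

-- ===== PRECONDITION & SPEC =====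
def Spec_get_comma_py (newick_str : String) (out : Int) : Prop := out = get_comma_py_alt newick_str
instance (newick_str : String) (out : Int) : Decidable (Spec_get_comma_py newick_str out) := by unfold Spec_get_comma_py; infer_instance

-- ===== CLAIM (what is proved, stated in full; the proofs are below) =====
def Claim_equal_get_comma_py : Prop := ∀ (newick_str : String), Dom_get_comma_py newick_str → Spec_get_comma_py newick_str (get_comma_py newick_str)

-- ===== LEMMAS AND PROOFS =====

lemma pvGetD_eq (full : List Char) (i : Nat) (hi : i < full.length) : full.getD i ' ' = full[i] := by
  simp [List.getD_eq_getElem?_getD, List.getElem?_eq_getElem hi]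

lemma pvTake_succ_count (full : List Char) (i : Nat) (hi : i < full.length) (c : Char) :
    (full.take (i + 1)).count c = (full.take i).count c + (if full[i] = c then 1 else 0) := by
  rw [List.take_add_one, List.getElem?_eq_getElem hi]
  simp only [Option.toList_some, List.count_append, List.count_cons, List.count_nil, Nat.zero_add]
  by_cases h : full[i] = c <;> simp [h]

-- reference function: first index ≥ i that is a top-level comma, else the length
def pvFirst (full : List Char) (i : Nat) : Int :=
  if i < full.length then
    if full.getD i ' ' = ',' ∧ (full.take i).count '(' = (full.take i).count ')' then (i : Int)
    else pvFirst full (i + 1)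
  else (full.length : Int)
termination_by full.length - i

lemma pvGoA_eq_pvFirst (full : List Char) (i : Nat) (hi : i ≤ full.length) :
    pvGoA (full.drop i) (((full.take i).count '(' : Int) - ((full.take i).count ')' : Int)) i
      = pvFirst full i := by
  induction hn : full.length - i using Nat.strong_induction_on generalizing i with
  | _ n ih =>
  rcases Nat.lt_or_ge i full.length with hlt | hge
  · have hg := pvGetD_eq full i hlt
    have hdrop : full.drop i = full[i] :: full.drop (i + 1) := List.drop_eq_getElem_cons hlt
    have hco := pvTake_succ_count full i hlt '('
    have hcc := pvTake_succ_count full i hlt ')'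
    have hrec : ∀ lv : Int,
        lv = ((full.take (i + 1)).count '(' : Int) - ((full.take (i + 1)).count ')' : Int) →
        pvGoA (full.drop (i + 1)) lv ((i : Int) + 1) = pvFirst full (i + 1) := by
      intro lv hlv
      have hcast : ((i : Int) + 1) = ((i + 1 : Nat) : Int) := by push_cast; ring
      rw [hlv, hcast]
      exact ih (full.length - (i + 1)) (by omega) (i + 1) (by omega) rfl
    rw [hdrop]
    simp only [pvGoA]
    unfold pvFirst
    rw [if_pos hlt, hg]
    by_cases h1 : full[i] = '('
    · have h2 : ¬ full[i] = ')' := by rw [h1]; decide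
      have hne : ¬ (full[i] = ',' ∧ (full.take i).count '(' = (full.take i).count ')') := by
        rw [h1]; rintro ⟨h, -⟩; cases h
      rw [if_pos h1, if_neg hne]
      refine hrec _ ?_
      rw [hco, hcc, if_pos h1, if_neg h2]
      push_cast; ring
    · by_cases h2 : full[i] = ')'
      · have hne : ¬ (full[i] = ',' ∧ (full.take i).count '(' = (full.take i).count ')') := by
          rw [h2]; rintro ⟨h, -⟩; cases h
        rw [if_neg h1, if_pos h2, if_neg hne]
        refine hrec _ ?_
        rw [hco, hcc, if_neg h1, if_pos h2]
        push_cast; ring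
      · rw [if_neg h1, if_neg h2]
        by_cases h3 : full[i] = ',' ∧
            ((full.take i).count '(' : Int) - ((full.take i).count ')' : Int) = 0
        · have h3' : full[i] = ',' ∧ (full.take i).count '(' = (full.take i).count ')' :=
            ⟨h3.1, by have := h3.2; omega⟩
          rw [if_pos h3, if_pos h3']
        · have h3' : ¬ (full[i] = ',' ∧ (full.take i).count '(' = (full.take i).count ')') := by
            rintro ⟨ha, hb⟩; exact h3 ⟨ha, by omega⟩
          rw [if_neg h3, if_neg h3']
          refine hrec _ ?_
          rw [hco, hcc, if_neg h1, if_neg h2]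
          push_cast; ring
  · have hd : full.drop i = [] := List.drop_eq_nil_of_le hge
    have hi' : i = full.length := by omega
    subst hi'
    rw [hd]
    unfold pvFirst
    rw [if_neg (lt_irrefl _)]
    simp [pvGoA]

lemma pvBLoop_eq_pvFirst (full : List Char) (i : Nat) :
    (match (full.drop i).findIdx? (fun c => c == ',') with
      | some j => pvBLoop full (i + j)
      | none => (full.length : Int)) = pvFirst full i := by
  induction hn : full.length - i using Nat.strong_induction_on generalizing i with
  | _ n ih =>
  rcases Nat.lt_or_ge i full.length with hlt | hge
  · have hg := pvGetD_eq full i hlt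
    have hdrop : full.drop i = full[i] :: full.drop (i + 1) := List.drop_eq_getElem_cons hlt
    have hrest := ih (full.length - (i + 1)) (by omega) (i + 1) rfl
    unfold pvFirst
    rw [if_pos hlt, hg, hdrop, List.findIdx?_cons]
    by_cases h1 : full[i] = ','
    · rw [if_pos (by simp [h1])]
      show pvBLoop full (i + 0) = _
      rw [Nat.add_zero, pvBLoop]
      by_cases h2 : (full.take i).count '(' = (full.take i).count ')'
      · rw [if_pos h2, if_pos ⟨h1, h2⟩]
      · rw [if_neg h2, if_neg (by rintro ⟨-, h⟩; exact h2 h), ← hrest]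
        split <;> rename_i hsc <;> rw [hsc]
    · rw [if_neg (by simp [h1]), if_neg (by rintro ⟨h, -⟩; exact h1 h), ← hrest]
      cases hsc : (full.drop (i + 1)).findIdx? (fun c => c == ',') with
      | none => simp
      | some j =>
        simp only [Option.map_some]
        have e : i + (j + 1) = i + 1 + j := by omega
        rw [e]
  · have hd : full.drop i = [] := List.drop_eq_nil_of_le hge
    rw [hd, List.findIdx?_nil]
    unfold pvFirst
    rw [if_neg (Nat.not_lt.mpr hge)]

-- ===== VERDICT (by name: the statement is the Claim_ definition above) =====
theorem get_comma_py_spec : Claim_equal_get_comma_py := by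
  intro s _
  unfold Spec_get_comma_py get_comma_py get_comma_py_alt
  by_cases h : s.toList = []
  · simp [h]
  · simp only [h, List.length_eq_zero_iff]
    have hA := pvGoA_eq_pvFirst s.toList 0 (Nat.zero_le _)
    have hB := pvBLoop_eq_pvFirst s.toList 0
    simp only [List.take_zero, List.drop_zero, List.count_nil, Nat.cast_zero, sub_zero] at hA hB
    rw [hA, ← hB]
    cases hsc : s.toList.findIdx? (fun c => c == ',') <;> simp
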